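-- pv_equiv track=rewrite | github.com/rodrigueswilson/lesson-plan-browser | backend/llm_service.py | _identify_field_at_position
-- ===== SOURCE A (Python) =====
-- from typing import Any, Callable, Dict, List, Optional, Tuple
--
-- def _identify_field_at_position(
--     json_string: str, position: int
-- ) -> Optional[str]:
--     """Find which field is being generated at the given position"""
--     # Common field patterns
--     field_patterns = [
--         ('"unit_lesson":', "unit_lesson"),
--         ('"objective":', "objective"),
--         ('"anticipatory_set":', "anticipatory_set"),
--         ('"tailored_instruction":', "tailored_instruction"),
--         ('"misconceptions":', "misconceptions"),
--         ('"assessment":', "assessment"),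
--         ('"homework":', "homework"),
--         ('"content_objective":', "content_objective"),
--         ('"student_goal":', "student_goal"),
--         ('"wida_objective":', "wida_objective"),
--         ('"bilingual_bridge":', "bilingual_bridge"),
--         ('"co_teaching_model":', "co_teaching_model"),
--         ('"ell_support":', "ell_support"),
--         ('"vocabulary_cognates":', "vocabulary_cognates"),
--         ('"sentence_frames":', "sentence_frames"),
--     ]
--     text_before = json_string[:position]
--     last_field = None
--     last_pos = -1
--     for pattern, field_name in field_patterns:
--         pos = text_before.rfind(pattern)
--         if pos > last_pos:
--             last_pos = pos
--             last_field = field_name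
--     return last_field
-- ===== SOURCE B (Python) =====
-- _FIELD_NAMES = [
--     "unit_lesson", "objective", "anticipatory_set", "tailored_instruction",
--     "misconceptions", "assessment", "homework", "content_objective",
--     "student_goal", "wida_objective", "bilingual_bridge", "co_teaching_model",
--     "ell_support", "vocabulary_cognates", "sentence_frames",
-- ]
--
--
-- def _identify_field_at_position(json_string, position):
--     """Find which field is being generated at the given position"""
--     text_before = json_string[:position]
--     for i in range(len(text_before) - 1, -1, -1):
--         for name in _FIELD_NAMES:
--             if text_before.startswith('"' + name + '":', i):
--                 return name
--     return None
-- ===== Notes on version B (the rewrite author's own statement) =====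
-- stated objective: alternative
-- what changed: Replaces the 15 independent rfind scans with running-maximum tracking by a single backward scan over the prefix that returns the first (i.e. rightmost) position where any field pattern starts; correct because two distinct patterns can never start at the same position.
import Mathlib
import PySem

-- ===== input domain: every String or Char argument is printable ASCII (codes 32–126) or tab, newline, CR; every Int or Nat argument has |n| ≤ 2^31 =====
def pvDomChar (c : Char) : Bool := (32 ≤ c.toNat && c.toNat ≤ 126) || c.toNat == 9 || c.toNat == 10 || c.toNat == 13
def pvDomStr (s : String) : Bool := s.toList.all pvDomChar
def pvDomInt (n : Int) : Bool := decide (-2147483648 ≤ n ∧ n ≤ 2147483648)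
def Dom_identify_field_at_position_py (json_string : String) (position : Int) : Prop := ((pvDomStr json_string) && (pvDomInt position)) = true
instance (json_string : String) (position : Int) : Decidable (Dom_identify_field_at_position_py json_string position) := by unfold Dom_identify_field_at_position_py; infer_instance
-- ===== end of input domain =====

-- B replaces A's 15 independent rfind scans (tracking the maximal hit) by one backward scan over the
-- prefix that returns at the first, i.e. rightmost, position where any field pattern starts (alternative).

-- ===== PORT A =====
def pvFieldPatterns : List (String × String) :=
  [("\"unit_lesson\":", "unit_lesson"),
   ("\"objective\":", "objective"),
   ("\"anticipatory_set\":", "anticipatory_set"),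
   ("\"tailored_instruction\":", "tailored_instruction"),
   ("\"misconceptions\":", "misconceptions"),
   ("\"assessment\":", "assessment"),
   ("\"homework\":", "homework"),
   ("\"content_objective\":", "content_objective"),
   ("\"student_goal\":", "student_goal"),
   ("\"wida_objective\":", "wida_objective"),
   ("\"bilingual_bridge\":", "bilingual_bridge"),
   ("\"co_teaching_model\":", "co_teaching_model"),
   ("\"ell_support\":", "ell_support"),
   ("\"vocabulary_cognates\":", "vocabulary_cognates"),
   ("\"sentence_frames\":", "sentence_frames")]

def identify_field_at_position_py (json_string : String) (position : Int) : Option String :=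
  let text_before := PySem.Str.slice json_string none (some position)
  (pvFieldPatterns.foldl
    (fun (st : Int × Option String) pf =>
      let pos := PySem.Str.rfind text_before pf.1
      if pos > st.1 then (pos, some pf.2) else st)
    (-1, none)).2

-- ===== PORT B =====
def pvFieldNames : List String :=
  ["unit_lesson", "objective", "anticipatory_set", "tailored_instruction",
   "misconceptions", "assessment", "homework", "content_objective",
   "student_goal", "wida_objective", "bilingual_bridge", "co_teaching_model",
   "ell_support", "vocabulary_cognates", "sentence_frames"]

-- Source B's 'text_before.startswith('"' + name + '":', i)' with 0 ≤ i < len(text_before) is exactly a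
-- prefix test on the characters from i on (exact on that index range).
def pvAltGo (t : List Char) : Nat → Option String
  | 0 => none
  | i + 1 =>
    match pvFieldNames.find?
        (fun name => PySem.Chars.startswith (t.drop i) ("\"" ++ name ++ "\":").toList) with
    | some name => some name
    | none => pvAltGo t i

def identify_field_at_position_py_alt (json_string : String) (position : Int) : Option String :=
  let text_before := PySem.Str.slice json_string none (some position)
  pvAltGo text_before.toList text_before.toList.length

-- ===== PRECONDITION & SPEC =====
def Spec_identify_field_at_position_py (json_string : String) (position : Int) (out : Option String) : Prop := out = identify_field_at_position_py_alt json_string position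
instance (json_string : String) (position : Int) (out : Option String) : Decidable (Spec_identify_field_at_position_py json_string position out) := by unfold Spec_identify_field_at_position_py; infer_instance

-- ===== CLAIM (what is proved, stated in full; the proofs are below) =====
def Claim_equal_identify_field_at_position_py : Prop := ∀ (json_string : String) (position : Int), Dom_identify_field_at_position_py json_string position → Spec_identify_field_at_position_py json_string position (identify_field_at_position_py json_string position)

-- ===== LEMMAS AND PROOFS =====

def pvPat (n : String) : List Char := ("\"" ++ n ++ "\":").toList

def pvMatchAt (t : List Char) (i : Nat) : Option String :=
  pvFieldNames.find? (fun name => PySem.Chars.startswith (t.drop i) (pvPat name))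

lemma pv_pat_ne_nil : ∀ n ∈ pvFieldNames, pvPat n ≠ [] := by decide

lemma pv_pat_prefix_eq :
    ∀ n₁ ∈ pvFieldNames, ∀ n₂ ∈ pvFieldNames, pvPat n₁ <+: pvPat n₂ → n₁ = n₂ := by decide

lemma pv_patterns_eq :
    pvFieldPatterns = pvFieldNames.map (fun n => ("\"" ++ n ++ "\":", n)) := by decide

-- rfind.go spec
lemma pv_go_le (t sub : List Char) (k : Nat) : PySem.Chars.rfind.go t sub k ≤ (k : Int) := by
  induction k with
  | zero => simp only [PySem.Chars.rfind.go]; split <;> omega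
  | succ k ih =>
    simp only [PySem.Chars.rfind.go]
    split
    · omega
    · push_cast; omega

lemma pv_go_neg_one (t sub : List Char) (k : Nat)
    (h : ∀ i ≤ k, ¬ sub.isPrefixOf (t.drop i) = true) :
    PySem.Chars.rfind.go t sub k = -1 := by
  induction k with
  | zero =>
    have h0 := h 0 (Nat.le_refl 0)
    rw [List.drop_zero] at h0
    simp [PySem.Chars.rfind.go, h0]
  | succ k ih =>
    simp only [PySem.Chars.rfind.go, h (k + 1) (Nat.le_refl _)]
    exact ih (fun i hi => h i (Nat.le_succ_of_le hi))

lemma pv_go_spec (t sub : List Char) (k : Nat) (h : PySem.Chars.rfind.go t sub k ≠ -1) :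
    0 ≤ PySem.Chars.rfind.go t sub k ∧
      sub.isPrefixOf (t.drop (PySem.Chars.rfind.go t sub k).toNat) = true := by
  induction k with
  | zero =>
    by_cases hp : sub.isPrefixOf (t.drop 0) = true
    · rw [List.drop_zero] at hp
      simp [PySem.Chars.rfind.go, hp]
    · rw [List.drop_zero] at hp
      simp only [PySem.Chars.rfind.go] at h
      simp [hp] at h
  | succ k ih =>
    by_cases hp : sub.isPrefixOf (t.drop (k + 1)) = true
    · simp only [PySem.Chars.rfind.go, hp, if_true]
      refine ⟨by push_cast; omega, ?_⟩
      have hk : ((k : Int) + 1).toNat = k + 1 := by omega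
      push_cast
      rw [hk]
      exact hp
    · simp only [PySem.Chars.rfind.go, hp] at h ⊢
      exact ih h

lemma pv_go_eq (t sub : List Char) (k j : Nat) (hjk : j ≤ k)
    (hj : sub.isPrefixOf (t.drop j) = true)
    (hmax : ∀ i, j < i → i ≤ k → ¬ sub.isPrefixOf (t.drop i) = true) :
    PySem.Chars.rfind.go t sub k = (j : Int) := by
  induction k with
  | zero =>
    have hj0 : j = 0 := Nat.le_zero.mp hjk
    subst hj0
    simp only [PySem.Chars.rfind.go]
    simp only [List.drop_zero] at hj ⊢
    simp [hj]
  | succ k ih =>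
    simp only [PySem.Chars.rfind.go]
    rcases Nat.lt_or_ge j (k + 1) with hlt | hge
    · have hnp : ¬ sub.isPrefixOf (t.drop (k + 1)) = true :=
        hmax (k + 1) hlt (Nat.le_refl _)
      simp only [hnp]
      exact ih (Nat.lt_succ_iff.mp hlt) (fun i hji hik => hmax i hji (Nat.le_succ_of_le hik))
    · have hje : j = k + 1 := Nat.le_antisymm hjk hge
      subst hje
      simp [hj]

-- fold spec
lemma pv_fold_stay (f : String → Int) (l : List String) (st : Int × Option String)
    (h : ∀ n ∈ l, f n ≤ st.1) :
    l.foldl (fun st n => if f n > st.1 then (f n, some n) else st) st = st := by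
  induction l with
  | nil => rfl
  | cons n rest ih =>
    have hn : ¬ f n > st.1 := by
      have := h n (List.mem_cons_self ..)
      omega
    simp only [List.foldl_cons, hn]
    exact ih (fun n hn => h n (List.mem_cons_of_mem _ hn))

lemma pv_fold_max (f : String → Int) (m : Int) (n' : String) (l : List String)
    (st : Int × Option String) (hmem : n' ∈ l) (hfm : f n' = m)
    (hle : ∀ n ∈ l, f n ≤ m) (huniq : ∀ n ∈ l, f n = m → n = n') (hst : st.1 < m) :
    l.foldl (fun st n => if f n > st.1 then (f n, some n) else st) st = (m, some n') := by
  induction l generalizing st with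
  | nil => exact absurd hmem (List.not_mem_nil)
  | cons n rest ih =>
    simp only [List.foldl_cons]
    by_cases hgt : f n > st.1
    · simp only [hgt, if_true]
      by_cases hm : f n = m
      · have hnn : n = n' := huniq n (List.mem_cons_self ..) hm
        subst hnn
        rw [hm]
        exact pv_fold_stay f rest (m, some n)
          (fun x hx => hle x (List.mem_cons_of_mem _ hx))
      · have hmem' : n' ∈ rest := by
          rcases List.mem_cons.mp hmem with h1 | h1
          · exact absurd (h1 ▸ hfm) hm
          · exact h1
        have hlt : f n < m := lt_of_le_of_ne (hle n (List.mem_cons_self ..)) hm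
        exact ih _ hmem' (fun x hx => hle x (List.mem_cons_of_mem _ hx))
          (fun x hx => huniq x (List.mem_cons_of_mem _ hx)) hlt
    · simp only [hgt]
      have hmem' : n' ∈ rest := by
        rcases List.mem_cons.mp hmem with h1 | h1
        · subst h1
          exact absurd (by omega : f n' > st.1) hgt
        · exact h1
      exact ih _ hmem' (fun x hx => hle x (List.mem_cons_of_mem _ hx))
        (fun x hx => huniq x (List.mem_cons_of_mem _ hx)) hst

-- pvAltGo spec
lemma pv_altGo_succ (t : List Char) (i : Nat) :
    pvAltGo t (i + 1) = match pvMatchAt t i with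
      | some name => some name
      | none => pvAltGo t i := rfl

lemma pv_altGo_none (t : List Char) (k : Nat) (h : ∀ i < k, pvMatchAt t i = none) :
    pvAltGo t k = none := by
  induction k with
  | zero => rfl
  | succ k ih =>
    rw [pv_altGo_succ, h k (Nat.lt_succ_self k)]
    exact ih (fun i hi => h i (Nat.lt_succ_of_lt hi))

lemma pv_altGo_some (t : List Char) (k j : Nat) (n : String) (hjk : j < k)
    (hj : pvMatchAt t j = some n)
    (habove : ∀ i, j < i → i < k → pvMatchAt t i = none) :
    pvAltGo t k = some n := by
  induction k with
  | zero => omega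
  | succ k ih =>
    rw [pv_altGo_succ]
    rcases Nat.lt_or_ge j k with hlt | hge
    · rw [habove k (by omega) (Nat.lt_succ_self k)]
      exact ih hlt (fun i h1 h2 => habove i h1 (Nat.lt_succ_of_lt h2))
    · have hje : j = k := by omega
      subst hje
      rw [hj]

lemma pv_exists_max (t : List Char) (k : Nat) (h : ¬ ∀ i < k, pvMatchAt t i = none) :
    ∃ j < k, (pvMatchAt t j).isSome ∧ ∀ i, j < i → i < k → pvMatchAt t i = none := by
  induction k with
  | zero => exact absurd (by omega) h
  | succ k ih =>
    by_cases hk : pvMatchAt t k = none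
    · have h' : ¬ ∀ i < k, pvMatchAt t i = none := by
        intro hall
        exact h (fun i hi => by
          rcases Nat.lt_succ_iff_lt_or_eq.mp hi with h1 | h1
          · exact hall i h1
          · exact h1 ▸ hk)
      obtain ⟨j, hjk, hs, hab⟩ := ih h'
      exact ⟨j, Nat.lt_succ_of_lt hjk, hs, fun i h1 h2 => by
        rcases Nat.lt_succ_iff_lt_or_eq.mp h2 with h3 | h3
        · exact hab i h1 h3
        · exact h3 ▸ hk⟩
    · exact ⟨k, Nat.lt_succ_self k, Option.isSome_iff_ne_none.mpr hk,
        fun i h1 h2 => by omega⟩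

lemma pv_main (t : List Char) :
    (pvFieldPatterns.foldl
      (fun (st : Int × Option String) pf =>
        let pos := PySem.Chars.rfind t pf.1.toList
        if pos > st.1 then (pos, some pf.2) else st)
      (-1, none)).2 = pvAltGo t t.length := by
  have hfold : (pvFieldPatterns.foldl
      (fun (st : Int × Option String) pf =>
        let pos := PySem.Chars.rfind t pf.1.toList
        if pos > st.1 then (pos, some pf.2) else st)
      (-1, none)) = (pvFieldNames.foldl
      (fun (st : Int × Option String) n =>
        if PySem.Chars.rfind.go t (pvPat n) t.length > st.1
        then (PySem.Chars.rfind.go t (pvPat n) t.length, some n) else st)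
      (-1, none)) := by
    rw [pv_patterns_eq, List.foldl_map]
    rfl
  rw [hfold]
  have hlen : ∀ n ∈ pvFieldNames, ¬ (pvPat n).isPrefixOf (t.drop t.length) = true := by
    intro n hn
    rw [List.drop_length]
    intro hpre
    exact pv_pat_ne_nil n hn (List.prefix_nil.mp (List.isPrefixOf_iff_prefix.mp hpre))
  have hnone_iff : ∀ i, pvMatchAt t i = none →
      ∀ n ∈ pvFieldNames, ¬ (pvPat n).isPrefixOf (t.drop i) = true := by
    intro i hi n hn
    have := List.find?_eq_none.mp hi n hn
    simpa [PySem.Chars.startswith] using this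
  by_cases hall : ∀ i < t.length, pvMatchAt t i = none
  · rw [pv_altGo_none t _ hall]
    have hh : ∀ n ∈ pvFieldNames, PySem.Chars.rfind.go t (pvPat n) t.length ≤
        ((-1 : Int), (none : Option String)).1 := by
      intro n hn
      have : PySem.Chars.rfind.go t (pvPat n) t.length = -1 := by
        apply pv_go_neg_one
        intro i hi
        rcases Nat.lt_or_ge i t.length with h1 | h1
        · exact hnone_iff i (hall i h1) n hn
        · have he : i = t.length := Nat.le_antisymm hi h1
          exact he ▸ hlen n hn
      simp [this]
    rw [pv_fold_stay (fun n => PySem.Chars.rfind.go t (pvPat n) t.length) pvFieldNames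
      (-1, none) hh]
  · obtain ⟨j, hjk, hsome, habove⟩ := pv_exists_max t _ hall
    obtain ⟨n', hn'⟩ := Option.isSome_iff_exists.mp hsome
    rw [pv_altGo_some t _ j n' hjk hn' habove]
    have hmem : n' ∈ pvFieldNames := List.mem_of_find?_eq_some hn'
    have hpre : (pvPat n').isPrefixOf (t.drop j) = true := by
      have := List.find?_some hn'
      simpa [PySem.Chars.startswith] using this
    have hnab : ∀ n ∈ pvFieldNames, ∀ i, j < i → i ≤ t.length →
        ¬ (pvPat n).isPrefixOf (t.drop i) = true := by
      intro n hn i h1 h2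
      rcases Nat.lt_or_ge i t.length with h3 | h3
      · exact hnone_iff i (habove i h1 h3) n hn
      · have he : i = t.length := Nat.le_antisymm h2 h3
        exact he ▸ hlen n hn
    have hfj : PySem.Chars.rfind.go t (pvPat n') t.length = (j : Int) :=
      pv_go_eq t (pvPat n') t.length j (Nat.le_of_lt hjk) hpre (hnab n' hmem)
    have hle : ∀ n ∈ pvFieldNames, PySem.Chars.rfind.go t (pvPat n) t.length ≤ (j : Int) := by
      intro n hn
      by_contra hgt
      push Not at hgt
      have hne : PySem.Chars.rfind.go t (pvPat n) t.length ≠ -1 := by omega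
      obtain ⟨h0, hpn⟩ := pv_go_spec t (pvPat n) t.length hne
      have hlef := pv_go_le t (pvPat n) t.length
      exact hnab n hn (PySem.Chars.rfind.go t (pvPat n) t.length).toNat
        (by omega) (by omega) hpn
    have huniq : ∀ n ∈ pvFieldNames,
        PySem.Chars.rfind.go t (pvPat n) t.length = (j : Int) → n = n' := by
      intro n hn he
      have hne : PySem.Chars.rfind.go t (pvPat n) t.length ≠ -1 := by omega
      obtain ⟨h0, hpn⟩ := pv_go_spec t (pvPat n) t.length hne
      rw [he] at hpn
      simp only [Int.toNat_natCast] at hpn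
      rcases List.prefix_or_prefix_of_prefix (List.isPrefixOf_iff_prefix.mp hpn)
          (List.isPrefixOf_iff_prefix.mp hpre) with h3 | h3
      · exact pv_pat_prefix_eq n hn n' hmem h3
      · exact (pv_pat_prefix_eq n' hmem n hn h3).symm
    rw [pv_fold_max (fun n => PySem.Chars.rfind.go t (pvPat n) t.length) (j : Int) n'
      pvFieldNames (-1, none) hmem hfj hle huniq (by omega)]

-- ===== VERDICT (by name: the statement is the Claim_ definition above) =====
theorem identify_field_at_position_py_spec : Claim_equal_identify_field_at_position_py := by
  intro json_string position _
  unfold Spec_identify_field_at_position_py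
  unfold identify_field_at_position_py identify_field_at_position_py_alt
  simp only [PySem.Str.rfind, PySem.Str.toList_slice]
  exact pv_main _
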